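-- pv_equiv track=rewrite | github.com/TomKite57/advent_of_code_2017 | headers/day3.py | populate_squares
-- ===== SOURCE A (Python) =====
-- def get_neighbours(coord):
--     return [(coord[0]+dx, coord[1]+dy)
--             for dx in [-1, 0, 1] for dy in [-1, 0, 1]
--             if (dx!=0 or dy!=0)]
--
-- def populate_squares(coords, target):
--     value_dict = {(0,0): 1,}
--     for coord in coords:
--         if coord == (0,0):
--             continue
--         value_dict[coord] = sum([value_dict.get(c, 0)
--                                  for c in get_neighbours(coord)])
--         if value_dict[coord] > target:
--             return value_dict[coord]
-- ===== SOURCE B (Python) =====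
-- # Scatter instead of gather: each finalised square pushes its value into its
-- # 8 neighbours' accumulators, so no neighbour lookup loop is needed at read time.
--
-- _OFFS = [(-1, -1), (-1, 0), (-1, 1), (0, -1), (0, 1), (1, -1), (1, 0), (1, 1)]
--
-- def _push(acc, coord, value):
--     for dx, dy in _OFFS:
--         n = (coord[0] + dx, coord[1] + dy)
--         acc[n] = acc.get(n, 0) + value
--
-- def populate_squares(coords, target):
--     acc = {}
--     _push(acc, (0, 0), 1)
--     for coord in coords:
--         if coord == (0, 0):
--             continue
--         value = acc.get(coord, 0)
--         if value > target:
--             return value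
--         _push(acc, coord, value)
-- ===== Notes on version B (the rewrite author's own statement) =====
-- stated objective: alternative
-- what changed: Replaced the backward gather (summing the 8 neighbours' dict values at each square) with a forward scatter that pushes each finalised square's value into its 8 neighbours' accumulators, so the value of a square is a single dict read.
-- outside the precondition, e.g. on populate_squares([(1, 0), (1, 0), (2, 0)], 1): A returns None, B returns 2
import Mathlib
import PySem

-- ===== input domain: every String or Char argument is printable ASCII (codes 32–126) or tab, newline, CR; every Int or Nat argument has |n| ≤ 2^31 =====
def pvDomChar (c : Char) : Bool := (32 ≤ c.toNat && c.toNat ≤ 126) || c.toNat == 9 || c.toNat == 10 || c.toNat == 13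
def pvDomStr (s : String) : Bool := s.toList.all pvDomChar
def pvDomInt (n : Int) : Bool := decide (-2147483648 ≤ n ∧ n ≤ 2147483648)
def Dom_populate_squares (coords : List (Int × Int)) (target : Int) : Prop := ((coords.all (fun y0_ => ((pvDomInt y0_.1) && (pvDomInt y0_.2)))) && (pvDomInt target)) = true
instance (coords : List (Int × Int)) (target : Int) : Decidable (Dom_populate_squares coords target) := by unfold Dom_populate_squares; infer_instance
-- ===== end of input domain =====

-- B replaces A's backward neighbour-gather with a forward scatter that pushes each
-- finalised square's value into its 8 neighbours' accumulators (alternative decomposition,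
-- same cost); equivalence is about the RETURN value on lists without repeated non-origin coords.

-- ===== PORT A =====
def get_neighbours (coord : Int × Int) : List (Int × Int) :=
  ([-1, 0, 1] : List Int).flatMap (fun dx =>
    (([-1, 0, 1] : List Int).filter (fun dy => dx != 0 || dy != 0)).map
      (fun dy => (coord.1 + dx, coord.2 + dy)))

def populate_squares_loop (target : Int) (d : PySem.Dict (Int × Int) Int) :
    List (Int × Int) → Option Int
  | [] => none
  | coord :: rest =>
    if coord = ((0, 0) : Int × Int) then populate_squares_loop target d rest
    else
      -- value_dict[coord] = sum([...]); the re-read value_dict[coord] is the value v just stored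
      let v := ((get_neighbours coord).map (fun c => d.getD c 0)).sum
      let d' := d.insert coord v
      if v > target then some v
      else populate_squares_loop target d' rest

def populate_squares (coords : List (Int × Int)) (target : Int) : Option Int :=
  populate_squares_loop target (PySem.Dict.ofList [((((0 : Int), (0 : Int))), (1 : Int))]) coords

-- ===== PORT B =====
def pvOFFS : List (Int × Int) :=
  [(-1, -1), (-1, 0), (-1, 1), (0, -1), (0, 1), (1, -1), (1, 0), (1, 1)]

def pvPush (acc : PySem.Dict (Int × Int) Int) (coord : Int × Int) (value : Int) :
    PySem.Dict (Int × Int) Int :=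
  pvOFFS.foldl (fun a o =>
    a.insert (coord.1 + o.1, coord.2 + o.2) (a.getD (coord.1 + o.1, coord.2 + o.2) 0 + value)) acc

def populate_squares_alt_loop (target : Int) (acc : PySem.Dict (Int × Int) Int) :
    List (Int × Int) → Option Int
  | [] => none
  | coord :: rest =>
    if coord = ((0, 0) : Int × Int) then populate_squares_alt_loop target acc rest
    else
      let value := acc.getD coord 0
      if value > target then some value
      else populate_squares_alt_loop target (pvPush acc coord value) rest

def populate_squares_alt (coords : List (Int × Int)) (target : Int) : Option Int :=
  populate_squares_alt_loop target (pvPush PySem.Dict.empty ((0 : Int), (0 : Int)) 1) coords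

-- ===== PRECONDITION & SPEC =====
-- Pre_ excludes lists that repeat a non-origin coordinate: there A overwrites the square's
-- dict entry on recomputation while B's scatter accumulates a second push, a defensible-corner
-- artefact of A's dict overwrite that neither behaviour specifies.
def Pre_populate_squares (coords : List (Int × Int)) (target : Int) : Prop :=
  (coords.filter (fun c => decide (c ≠ ((0, 0) : Int × Int)))).Nodup
instance (coords : List (Int × Int)) (target : Int) : Decidable (Pre_populate_squares coords target) := by unfold Pre_populate_squares; infer_instance

def pvWitness_populate_squares : (List (Int × Int)) × Int := ([(1, 0), (0, 1)], 5)

def Spec_populate_squares (coords : List (Int × Int)) (target : Int) (out : Option Int) : Prop := out = populate_squares_alt coords target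
instance (coords : List (Int × Int)) (target : Int) (out : Option Int) : Decidable (Spec_populate_squares coords target out) := by unfold Spec_populate_squares; infer_instance

-- ===== CLAIM (what is proved, stated in full; the proofs are below) =====
def Claim_equal_populate_squares : Prop := ∀ (coords : List (Int × Int)) (target : Int), Dom_populate_squares coords target → Pre_populate_squares coords target → Spec_populate_squares coords target (populate_squares coords target)

-- ===== LEMMAS AND PROOFS =====

-- A's neighbour list is B's offset list shifted by the coordinate.
lemma get_neighbours_eq (c : Int × Int) :
    get_neighbours c = pvOFFS.map (fun o => (c.1 + o.1, c.2 + o.2)) := by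
  simp [get_neighbours, pvOFFS]

lemma mem_shift_symm (c x : Int × Int) :
    x ∈ pvOFFS.map (fun o => (c.1 + o.1, c.2 + o.2)) ↔
    c ∈ pvOFFS.map (fun o => (x.1 + o.1, x.2 + o.2)) := by
  obtain ⟨c1, c2⟩ := c; obtain ⟨x1, x2⟩ := x
  simp [pvOFFS, Prod.ext_iff]
  omega

lemma nodup_shift (c : Int × Int) :
    (pvOFFS.map (fun o => (c.1 + o.1, c.2 + o.2))).Nodup := by
  refine List.Nodup.map ?_ (by decide)
  intro a b h
  obtain ⟨a1, a2⟩ := a; obtain ⟨b1, b2⟩ := b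
  simp [Prod.ext_iff] at h ⊢
  omega

lemma count_shift_symm (c x : Int × Int) :
    (pvOFFS.map (fun o => (c.1 + o.1, c.2 + o.2))).count x =
    (pvOFFS.map (fun o => (x.1 + o.1, x.2 + o.2))).count c := by
  by_cases h : x ∈ pvOFFS.map (fun o => (c.1 + o.1, c.2 + o.2))
  · rw [List.count_eq_one_of_mem (nodup_shift c) h,
      List.count_eq_one_of_mem (nodup_shift x) ((mem_shift_symm c x).mp h)]
  · rw [List.count_eq_zero_of_not_mem h,
      List.count_eq_zero_of_not_mem (fun hc => h ((mem_shift_symm c x).mpr hc))]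

-- gather side: inserting a fresh key adds v once per occurrence among the summed keys
lemma sum_getD_insert (ns : List (Int × Int)) (d : PySem.Dict (Int × Int) Int)
    (c : Int × Int) (v : Int) (h : d.getD c 0 = 0) :
    (ns.map (fun n => (d.insert c v).getD n 0)).sum =
    (ns.map (fun n => d.getD n 0)).sum + v * ns.count c := by
  induction ns with
  | nil => simp
  | cons n ns ih =>
    simp only [List.map_cons, List.sum_cons, List.count_cons, ih]
    rw [PySem.Dict.getD_insert]
    by_cases hn : n = c
    · subst hn; simp [h]; ring
    · simp [hn]; ring

-- scatter side: a push adds v once per occurrence of x among the pushed-to keys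
lemma getD_push_general (os : List (Int × Int)) (acc : PySem.Dict (Int × Int) Int)
    (c x : Int × Int) (v : Int) :
    (os.foldl (fun a o =>
        a.insert (c.1 + o.1, c.2 + o.2) (a.getD (c.1 + o.1, c.2 + o.2) 0 + v)) acc).getD x 0 =
    acc.getD x 0 + v * ((os.map (fun o => (c.1 + o.1, c.2 + o.2))).count x) := by
  induction os generalizing acc with
  | nil => simp
  | cons o os ih =>
    simp only [List.foldl_cons, List.map_cons, List.count_cons, ih]
    rw [PySem.Dict.getD_insert]
    by_cases hx : x = (c.1 + o.1, c.2 + o.2)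
    · simp [hx]; ring
    · have hx' : ((c.1 + o.1, c.2 + o.2) : Int × Int) ≠ x := fun h => hx h.symm
      simp [hx, hx']

lemma getD_pvPush (acc : PySem.Dict (Int × Int) Int) (c x : Int × Int) (v : Int) :
    (pvPush acc c v).getD x 0 =
    acc.getD x 0 + v * ((pvOFFS.map (fun o => (c.1 + o.1, c.2 + o.2))).count x) :=
  getD_push_general pvOFFS acc c x v

-- the loop invariant: B's accumulator at x is A's neighbour-sum at x
lemma loop_eq (coords : List (Int × Int)) :
    ∀ (d acc : PySem.Dict (Int × Int) Int) (target : Int),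
    (coords.filter (fun c => decide (c ≠ ((0, 0) : Int × Int)))).Nodup →
    (∀ c ∈ coords, c ≠ ((0, 0) : Int × Int) → d.getD c 0 = 0) →
    (∀ x, acc.getD x 0 = ((get_neighbours x).map (fun n => d.getD n 0)).sum) →
    populate_squares_loop target d coords = populate_squares_alt_loop target acc coords := by
  induction coords with
  | nil => intro _ _ _ _ _ _; rfl
  | cons coord rest ih =>
    intro d acc target hnd hfresh hinv
    by_cases h0 : coord = ((0, 0) : Int × Int)
    · simp only [populate_squares_loop, populate_squares_alt_loop, if_pos h0]
      refine ih d acc target ?_ (fun c hc => hfresh c (List.mem_cons_of_mem _ hc)) hinv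
      simpa [List.filter_cons, h0] using hnd
    · simp only [populate_squares_loop, populate_squares_alt_loop, if_neg h0]
      have hv : acc.getD coord 0 = ((get_neighbours coord).map (fun n => d.getD n 0)).sum :=
        hinv coord
      rw [List.filter_cons_of_pos (by simp [h0])] at hnd
      have hrest : (rest.filter (fun c => decide (c ≠ ((0, 0) : Int × Int)))).Nodup :=
        hnd.of_cons
      have hnotin : coord ∉ rest.filter (fun c => decide (c ≠ ((0, 0) : Int × Int))) :=
        (List.nodup_cons.mp hnd).1
      have hcoord0 : d.getD coord 0 = 0 := hfresh coord (List.mem_cons_self) h0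
      rw [← hv]
      by_cases hgt : acc.getD coord 0 > target
      · simp [hgt]
      · simp only [if_neg hgt]
        refine ih _ _ target hrest ?_ ?_
        · intro c hc hc0
          have hne : c ≠ coord := by
            intro he; exact hnotin (he ▸ List.mem_filter.mpr ⟨hc, by simp [hc0]⟩)
          rw [PySem.Dict.getD_insert, if_neg hne]
          exact hfresh c (List.mem_cons_of_mem _ hc) hc0
        · intro x
          rw [getD_pvPush, hinv x, get_neighbours_eq x,
            sum_getD_insert _ _ _ _ hcoord0, count_shift_symm]

lemma sum_getD_empty (ns : List (Int × Int)) :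
    (ns.map (fun n => (PySem.Dict.empty : PySem.Dict (Int × Int) Int).getD n 0)).sum = 0 := by
  simp [PySem.Dict.getD_empty]

-- ===== VERDICT (by name: the statement is the Claim_ definition above) =====
theorem populate_squares_spec : Claim_equal_populate_squares := by
  intro coords target _ hpre
  show populate_squares coords target = populate_squares_alt coords target
  unfold populate_squares populate_squares_alt
  refine loop_eq coords _ _ target hpre ?_ ?_
  · intro c _ hc0
    have : (PySem.Dict.ofList [((((0 : Int), (0 : Int))), (1 : Int))]) =
        (PySem.Dict.empty.insert ((0 : Int), (0 : Int)) 1) := rfl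
    rw [this, PySem.Dict.getD_insert, if_neg hc0, PySem.Dict.getD_empty]
  · intro x
    have hd : (PySem.Dict.ofList [((((0 : Int), (0 : Int))), (1 : Int))]) =
        (PySem.Dict.empty.insert ((0 : Int), (0 : Int)) 1) := rfl
    rw [getD_pvPush, hd, get_neighbours_eq x,
      sum_getD_insert _ _ _ _
        (by simp : (PySem.Dict.empty : PySem.Dict (Int × Int) Int).getD ((0 : Int), (0 : Int)) 0 = 0),
      sum_getD_empty, count_shift_symm]
    simp
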